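-- pv_equiv track=rewrite | github.com/nada191/Info-extraction-KYC-docs | passport.py | delete_signs
-- ===== SOURCE A (Python) =====
-- def delete_signs(sent):
--     sent = sent.strip()
--     L = sent.split(' ')
--     word = ''
--     j = len(L)
--     for i in L:
--         if i == '':
--             j = L.index(i)
--     L = L[:j]
--     word = ' '.join(L)
--     return word
-- ===== SOURCE B (Python) =====
-- def delete_signs(sent):
--     out = []
--     for tok in sent.strip().split(' '):
--         if tok == '':
--             break
--         out.append(tok)
--     return ' '.join(out)
-- ===== Notes on version B (the rewrite author's own statement) =====
-- stated objective: simpler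
-- what changed: Replace the full scan that repeatedly recomputes the index of the first empty token plus a slice-and-join with a single early-exit loop that accumulates tokens until the first empty one.
import Mathlib
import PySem

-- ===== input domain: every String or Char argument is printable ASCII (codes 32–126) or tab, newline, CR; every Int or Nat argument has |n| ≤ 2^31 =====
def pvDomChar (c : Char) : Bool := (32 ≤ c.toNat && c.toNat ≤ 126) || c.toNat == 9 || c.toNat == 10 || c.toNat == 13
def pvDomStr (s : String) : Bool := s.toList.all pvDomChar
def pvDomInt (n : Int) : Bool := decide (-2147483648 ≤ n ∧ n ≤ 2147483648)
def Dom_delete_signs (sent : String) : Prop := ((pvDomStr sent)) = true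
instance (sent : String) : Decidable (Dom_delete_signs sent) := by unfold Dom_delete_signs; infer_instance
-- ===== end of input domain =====

-- B replaces A's full scan (repeated L.index('') then slice + join) with a single early-exit
-- accumulating loop (takeWhile); objective: simpler.

-- ===== PORT A =====
-- Ported over List Char (String.toList is exact). L.index(i) is only evaluated with i drawn
-- from L, so it never raises; ported as index? with a default that is never reached.
def delete_signs (sent : String) : String :=
  let s := PySem.Chars.strip sent.toList
  let L := PySem.Chars.splitOn s [' ']
  let j : Nat := L.foldl (fun j i => if i = ([] : List Char) then (PySem.List.index? L i).getD j else j) L.length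
  let L' := PySem.List.slice L none (some (j : Int))
  String.ofList (PySem.Chars.join [' '] L')

-- ===== PORT B =====
def delete_signs_alt (sent : String) : String :=
  String.ofList (PySem.Chars.join [' ']
    ((PySem.Chars.splitOn (PySem.Chars.strip sent.toList) [' ']).takeWhile (fun t => t != ([] : List Char))))

-- ===== PRECONDITION & SPEC =====
def Spec_delete_signs (sent : String) (out : String) : Prop := out = delete_signs_alt sent
instance (sent : String) (out : String) : Decidable (Spec_delete_signs sent out) := by unfold Spec_delete_signs; infer_instance

-- ===== CLAIM (what is proved, stated in full; the proofs are below) =====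
def Claim_equal_delete_signs : Prop := ∀ (sent : String), Dom_delete_signs sent → Spec_delete_signs sent (delete_signs sent)

-- ===== LEMMAS AND PROOFS =====

theorem pv_idxOf?_of_mem (L : List (List Char)) (h : [] ∈ L) :
    List.idxOf? ([] : List Char) L = some (List.idxOf [] L) := by
  induction L with
  | nil => simp at h
  | cons x xs ih =>
    by_cases hx : x = ([] : List Char)
    · subst hx; simp [List.idxOf?_cons]
    · have hm : ([] : List Char) ∈ xs := by
        rcases List.mem_cons.mp h with e | e
        · exact absurd e.symm hx
        · exact e
      simp [List.idxOf?_cons, hx, ih hm]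

-- A's loop leaves j = index of the first empty token, or len L when there is none = L.idxOf [].
theorem pv_fold_eq_idxOf (L M : List (List Char)) (j0 : Nat)
    (h : ([] : List Char) ∈ M → ([] : List Char) ∈ L)
    (h0 : ([] : List Char) ∉ M → j0 = L.idxOf []) :
    M.foldl (fun j i => if i = ([] : List Char) then (PySem.List.index? L i).getD j else j) j0
      = L.idxOf [] := by
  induction M generalizing j0 with
  | nil => exact h0 (by simp)
  | cons m M ih =>
    by_cases hm : m = ([] : List Char)
    · subst hm
      have hL : ([] : List Char) ∈ L := h (by simp)
      have hix : PySem.List.index? L ([] : List Char) = some (L.idxOf []) := by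
        rw [PySem.List.index?_eq_idxOf?, pv_idxOf?_of_mem L hL]
      simp only [List.foldl_cons, hix, Option.getD_some]
      exact ih _ (fun _ => hL) (fun _ => rfl)
    · simp only [List.foldl_cons, if_neg hm]
      exact ih j0 (fun hmem => h (List.mem_cons_of_mem _ hmem))
        (fun hnm => h0 (fun hc => by
          rcases List.mem_cons.mp hc with e | e
          · exact hm e.symm
          · exact hnm e))

-- truncating at the first empty token is takeWhile (· ≠ [])
theorem pv_take_idxOf (L : List (List Char)) :
    L.take (L.idxOf ([] : List Char)) = L.takeWhile (fun t => t != ([] : List Char)) := by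
  induction L with
  | nil => simp
  | cons x xs ih =>
    by_cases hx : x = ([] : List Char)
    · subst hx; simp [List.idxOf_cons_self]
    · simp [List.idxOf_cons_ne _ hx, hx, ih]

-- ===== VERDICT (by name: the statement is the Claim_ definition above) =====
theorem delete_signs_spec : Claim_equal_delete_signs := by
  intro sent _
  unfold Spec_delete_signs delete_signs delete_signs_alt
  simp only [PySem.List.slice_to_natCast]
  rw [pv_fold_eq_idxOf _ _ _ (fun h => h) (fun hnm => (List.idxOf_eq_length_iff.mpr hnm).symm),
    pv_take_idxOf]
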